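-- pv_equiv track=rewrite | github.com/Shreyashchavare/SunBeam-GenAI-Assignment | Assignment1/Assignment1.py | sentence_analysis
-- ===== SOURCE A (Python) =====
-- def sentence_analysis(sentence):
--
--     """Q1:
--     Write a Python program that takes a sentence from the user and prints:
--
--     Number of characters
--
--     Number of words
--
--     Number of vowels
--
--     Hint: Use split(), loops, and vowel checking."""
--
--     num_chars_without_space = len(sentence.replace(" ",""))
--     num_words = len(sentence.split())
--     vowels = set("aeiouAEIOU")
--     sum_of_vowels = 0
--     for ch in sentence:
--         if ch in vowels:
--             sum_of_vowels +=1
--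
--     return num_chars_without_space, num_words, sum_of_vowels
-- ===== SOURCE B (Python) =====
-- def sentence_analysis(sentence):
--     vowels = set("aeiouAEIOU")
--     chars = 0
--     words = 0
--     vow = 0
--     prev_space = True
--     for ch in sentence:
--         if ch != ' ':
--             chars += 1
--         sp = ch.isspace()
--         if prev_space and not sp:
--             words += 1
--         prev_space = sp
--         if ch in vowels:
--             vow += 1
--     return chars, words, vow
-- ===== Notes on version B (the rewrite author's own statement) =====
-- stated objective: alternative
-- what changed: Replaced A's three separate passes (replace+len, split+len, vowel loop) by one single pass over the characters maintaining three accumulators and a previous-char-was-whitespace flag for word boundaries.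
import Mathlib
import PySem

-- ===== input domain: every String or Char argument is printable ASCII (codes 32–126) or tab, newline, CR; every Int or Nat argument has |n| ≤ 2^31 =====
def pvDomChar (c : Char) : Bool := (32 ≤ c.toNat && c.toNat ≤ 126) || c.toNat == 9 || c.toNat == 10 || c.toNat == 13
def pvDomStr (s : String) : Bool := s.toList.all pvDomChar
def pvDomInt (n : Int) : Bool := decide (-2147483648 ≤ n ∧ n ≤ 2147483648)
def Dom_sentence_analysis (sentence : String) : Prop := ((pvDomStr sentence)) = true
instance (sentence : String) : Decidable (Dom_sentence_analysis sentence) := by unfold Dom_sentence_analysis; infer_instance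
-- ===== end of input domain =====

-- ===== PORT A =====
-- B replaces A's three passes with one single-pass loop over the characters (alternative
-- decomposition, same O(n) cost). Port of A below is a literal transliteration.
def sentence_analysis (sentence : String) : Int × Int × Int :=
  let num_chars_without_space : Int := PySem.Str.len (PySem.Str.replace sentence " " "")
  let num_words : Int := (PySem.Str.split₀ sentence).length
  let vowels : PySem.Set Char := PySem.Set.ofList "aeiouAEIOU".toList
  let sum_of_vowels : Int :=
    sentence.toList.foldl (fun acc ch => if vowels.contains ch then acc + 1 else acc) 0
  (num_chars_without_space, num_words, sum_of_vowels)

-- ===== PORT B =====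
-- one fold step of B's single pass: (chars, words, vowels, prev_space)
def pvBStep (vowels : PySem.Set Char) (st : Int × Int × Int × Bool) (ch : Char) :
    Int × Int × Int × Bool :=
  let chars := if ch ≠ ' ' then st.1 + 1 else st.1
  let sp := PySem.Chars.isspace ch
  let words := if st.2.2.2 && !sp then st.2.1 + 1 else st.2.1
  let vow := if vowels.contains ch then st.2.2.1 + 1 else st.2.2.1
  (chars, words, vow, sp)

def sentence_analysis_alt (sentence : String) : Int × Int × Int :=
  let vowels : PySem.Set Char := PySem.Set.ofList "aeiouAEIOU".toList
  let st := sentence.toList.foldl (pvBStep vowels) (0, 0, 0, true)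
  (st.1, st.2.1, st.2.2.1)

-- ===== PRECONDITION & SPEC =====
def Spec_sentence_analysis (sentence : String) (out : Int × Int × Int) : Prop := out = sentence_analysis_alt sentence
instance (sentence : String) (out : Int × Int × Int) : Decidable (Spec_sentence_analysis sentence out) := by unfold Spec_sentence_analysis; infer_instance

-- ===== CLAIM (what is proved, stated in full; the proofs are below) =====
def Claim_equal_sentence_analysis : Prop := ∀ (sentence : String), Dom_sentence_analysis sentence → Spec_sentence_analysis sentence (sentence_analysis sentence)

-- ===== LEMMAS AND PROOFS =====

-- number of words remaining in l, given we are currently inside a word (A's split state)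
def pvW (l : List Char) (inWord : Bool) : Nat :=
  match l with
  | [] => if inWord then 1 else 0
  | c :: r =>
    if PySem.Chars.isspace c then (if inWord then 1 else 0) + pvW r false else pvW r true

-- number of word starts in l, given the previous char was whitespace iff p (B's state)
def pvT (l : List Char) (p : Bool) : Int :=
  match l with
  | [] => 0
  | c :: r => (if p && !PySem.Chars.isspace c then 1 else 0) + pvT r (PySem.Chars.isspace c)

-- whether the last char of l is whitespace (p if l is empty)
def pvLast (l : List Char) (p : Bool) : Bool :=
  match l with
  | [] => p
  | c :: r => pvLast r (PySem.Chars.isspace c)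

lemma pvW_eq_pvT (l : List Char) (p : Bool) :
    (pvW l (!p) : Int) = pvT l p + (if p then 0 else 1) := by
  induction l generalizing p with
  | nil => cases p <;> simp [pvW, pvT]
  | cons c r ih =>
    by_cases hs : PySem.Chars.isspace c
    · have h0 := ih true
      cases p <;> simp [pvW, pvT, hs, Bool.not_true] at * <;> omega
    · have h1 := ih false
      cases p <;> simp [pvW, pvT, hs, Bool.not_false] at * <;> omega

lemma replace_go_space (fuel : Nat) (l acc : List Char) (h : l.length ≤ fuel) :
    PySem.Chars.replace.go [' '] [] fuel l acc
      = acc.reverse ++ l.filter (fun c => !(c == ' ')) := by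
  induction fuel generalizing l acc with
  | zero =>
    have : l = [] := List.length_eq_zero_iff.mp (Nat.le_zero.mp h)
    simp [this, PySem.Chars.replace.go]
  | succ n ih =>
    cases l with
    | nil => simp [PySem.Chars.replace.go]
    | cons c t =>
      simp only [PySem.Chars.replace.go, List.isPrefixOf]
      by_cases hc : c = ' '
      · simp [hc, ih t acc (by simpa using Nat.le_of_succ_le_succ h)]
      · have hne : (' ' == c) = false := by
          simp only [beq_eq_false_iff_ne]; exact Ne.symm hc
        simp [hne, hc, ih t (c :: acc) (by simpa using Nat.le_of_succ_le_succ h)]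

lemma split₀_go_length (l : List Char) (cur : List Char) (acc : List (List Char)) :
    (PySem.Chars.split₀.go l cur acc).length = acc.length + pvW l (!cur.isEmpty) := by
  induction l generalizing cur acc with
  | nil =>
    by_cases hc : cur.isEmpty <;> simp [PySem.Chars.split₀.go, pvW, hc]
  | cons c r ih =>
    by_cases hs : PySem.Chars.isspace c
    · by_cases hc : cur.isEmpty
      · simp [PySem.Chars.split₀.go, hs, hc, pvW, ih [] acc]
      · simp [PySem.Chars.split₀.go, hs, hc, pvW, ih [] (cur.reverse :: acc)]; omega
    · simp [PySem.Chars.split₀.go, hs, pvW, ih (c :: cur) acc]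

lemma bfold (vowels : PySem.Set Char) (l : List Char) (c w v : Int) (p : Bool) :
    l.foldl (pvBStep vowels) (c, w, v, p)
      = (c + (l.countP (fun ch => !(ch == ' ')) : Int),
         w + pvT l p,
         v + (l.countP (fun ch => vowels.contains ch) : Int),
         pvLast l p) := by
  induction l generalizing c w v p with
  | nil => simp [pvT, pvLast]
  | cons ch r ih =>
    simp only [List.foldl_cons, pvBStep, List.countP_cons, pvT, pvLast]
    rw [ih]
    simp only [Prod.ext_iff]
    refine ⟨?_, ?_, ?_, trivial⟩ <;> split_ifs <;> simp_all <;> omega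

lemma afold (vowels : PySem.Set Char) (l : List Char) (a : Int) :
    l.foldl (fun acc ch => if vowels.contains ch then acc + 1 else acc) a
      = a + (l.countP (fun ch => vowels.contains ch) : Int) := by
  induction l generalizing a with
  | nil => simp
  | cons ch r ih =>
    rw [List.foldl_cons, ih]
    by_cases h : ch ∈ vowels <;> simp [h] <;> try ring

-- ===== VERDICT (by name: the statement is the Claim_ definition above) =====
lemma chars_eq (s : String) :
    PySem.Str.len (PySem.Str.replace s " " "") = (s.toList.countP (fun c => !(c == ' ')) : Int) := by
  rw [PySem.Str.len_eq, PySem.Str.toList_replace]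
  have h1 : (" ").toList = [' '] := rfl
  have h2 : ("").toList = ([] : List Char) := rfl
  rw [h1, h2]
  have : PySem.Chars.replace s.toList [' '] []
      = PySem.Chars.replace.go [' '] [] s.toList.length s.toList [] := by
    simp [PySem.Chars.replace]
  rw [this, replace_go_space _ _ _ (le_refl _)]
  simp [List.countP_eq_length_filter]

lemma words_eq (s : String) :
    ((PySem.Str.split₀ s).length : Int) = pvT s.toList true := by
  have h : (PySem.Str.split₀ s).length = (PySem.Chars.split₀ s.toList).length := by
    rw [← PySem.Str.split₀_map_toList, List.length_map]
  rw [h]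
  have h2 : PySem.Chars.split₀ s.toList = PySem.Chars.split₀.go s.toList [] [] := rfl
  rw [h2, split₀_go_length]
  have h3 := pvW_eq_pvT s.toList true
  simp at h3 ⊢
  omega

theorem sentence_analysis_spec : Claim_equal_sentence_analysis := by
  intro s _
  unfold Spec_sentence_analysis sentence_analysis sentence_analysis_alt
  simp only []
  rw [bfold, afold, chars_eq, words_eq]
  simp
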